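-- pv_equiv track=rewrite | github.com/imnole/zipcode | test 版本.py | generate_all_case_combinations
-- ===== SOURCE A (Python) =====
-- import itertools
--
-- def generate_all_case_combinations(password):
--     """生成给定密码的所有大小写组合"""
--     char_options = []
--     for char in password:
--         if char.isalpha():
--             char_options.append([char.lower(), char.upper()])
--         else:
--             char_options.append([char])
--
--     return [''.join(combo) for combo in itertools.product(*char_options)]
-- ===== SOURCE B (Python) =====
-- def generate_all_case_combinations(password):
--     """生成给定密码的所有大小写组合"""
--     results = ['']
--     for char in password:
--         new_results = []
--         for r in results:
--             if char.isalpha():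
--                 new_results.append(r + char.lower())
--                 new_results.append(r + char.upper())
--             else:
--                 new_results.append(r + char)
--         results = new_results
--     return results
-- ===== Notes on version B (the rewrite author's own statement) =====
-- stated objective: simpler
-- what changed: Replaces the options-list + itertools.product + join pipeline with a single left fold that extends every prefix in place (lower before upper), so no intermediate char_options list or tuple joining is needed.
import Mathlib
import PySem

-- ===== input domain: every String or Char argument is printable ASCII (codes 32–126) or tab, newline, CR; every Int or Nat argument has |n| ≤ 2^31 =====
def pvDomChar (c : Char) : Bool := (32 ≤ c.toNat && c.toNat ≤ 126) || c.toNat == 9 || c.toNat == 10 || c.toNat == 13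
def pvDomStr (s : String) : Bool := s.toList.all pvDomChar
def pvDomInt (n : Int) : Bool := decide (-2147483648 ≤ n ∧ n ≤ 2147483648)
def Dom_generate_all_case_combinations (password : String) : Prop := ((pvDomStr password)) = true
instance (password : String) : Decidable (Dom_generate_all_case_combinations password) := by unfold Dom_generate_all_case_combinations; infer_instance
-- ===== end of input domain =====

-- ===== PORT A =====
-- B changes the decomposition only: one prefix-extending left fold instead of
-- char_options + itertools.product + join. Same output order and values.

-- itertools.product(*lists): leftmost factor varies slowest.
def pvProduct : List (List Char) → List (List Char)
  | [] => [[]]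
  | l :: ls => l.flatMap (fun x => (pvProduct ls).map (fun combo => x :: combo))

-- the loop building char_options (append one options list per character)
def pvCharOptions (c : Char) : List Char :=
  if PySem.Chars.isalpha c then [PySem.Chars.lowerChar c, PySem.Chars.upperChar c] else [c]

def generate_all_case_combinations (password : String) : List String :=
  let char_options := password.toList.foldl (fun acc c => acc ++ [pvCharOptions c]) []
  (pvProduct char_options).map (fun combo => String.ofList combo)

-- ===== PORT B =====
-- one step of B's loop: extend every accumulated prefix with this character
def pvStep (results : List (List Char)) (c : Char) : List (List Char) :=
  results.flatMap (fun r =>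
    if PySem.Chars.isalpha c then
      [r ++ [PySem.Chars.lowerChar c], r ++ [PySem.Chars.upperChar c]]
    else
      [r ++ [c]])

def generate_all_case_combinations_alt (password : String) : List String :=
  (password.toList.foldl pvStep [[]]).map (fun r => String.ofList r)

-- ===== PRECONDITION & SPEC =====
def Spec_generate_all_case_combinations (password : String) (out : List String) : Prop := out = generate_all_case_combinations_alt password
instance (password : String) (out : List String) : Decidable (Spec_generate_all_case_combinations password out) := by unfold Spec_generate_all_case_combinations; infer_instance

-- ===== CLAIM (what is proved, stated in full; the proofs are below) =====
def Claim_equal_generate_all_case_combinations : Prop := ∀ (password : String), Dom_generate_all_case_combinations password → Spec_generate_all_case_combinations password (generate_all_case_combinations password)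

-- ===== LEMMAS AND PROOFS =====

theorem pvStep_eq (results : List (List Char)) (c : Char) :
    pvStep results c = results.flatMap (fun r => (pvCharOptions c).map (fun x => r ++ [x])) := by
  unfold pvStep pvCharOptions
  by_cases h : PySem.Chars.isalpha c <;> simp [h]

theorem pvFold_options (l : List Char) (acc : List (List Char)) :
    l.foldl (fun acc c => acc ++ [pvCharOptions c]) acc = acc ++ l.map pvCharOptions := by
  induction l generalizing acc with
  | nil => simp
  | cons c l ih => simp [List.foldl_cons, ih]

theorem pvFold_step (l : List Char) (init : List (List Char)) :
    l.foldl pvStep init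
      = init.flatMap (fun r => (pvProduct (l.map pvCharOptions)).map (fun combo => r ++ combo)) := by
  induction l generalizing init with
  | nil => simp [pvProduct]
  | cons c l ih =>
    simp [List.foldl_cons, ih, pvStep_eq, pvProduct, List.flatMap_assoc,
      List.map_flatMap, List.flatMap_map, List.map_map, Function.comp_def, List.append_assoc]

-- ===== VERDICT (by name: the statement is the Claim_ definition above) =====
theorem generate_all_case_combinations_spec : Claim_equal_generate_all_case_combinations := by
  intro password _
  unfold Spec_generate_all_case_combinations generate_all_case_combinations
    generate_all_case_combinations_alt
  rw [show password.toList.foldl (fun acc c => acc ++ [pvCharOptions c]) [] = password.toList.map pvCharOptions from by simpa using pvFold_options password.toList []]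
  simp [pvFold_step]
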